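-- pv_equiv track=rewrite | github.com/rubensilva091/University | Bachelor/Minho/Algorithmic Labs 2/Treino 1/cruzamentos.py | cruzamentos
-- ===== SOURCE A (Python) =====
-- def cruzamentos(ruas):
--     cruzamento = {}
--
--     for n in ruas:
--         cruzamento1=n[0]
--         cruzamento2=n[len(n)-1]
--
--         #inicilizar os cruzamentos
--         if(cruzamento1 not in cruzamento):
--             cruzamento[cruzamento1]=1
--         if (cruzamento2 not in cruzamento):
--             cruzamento[cruzamento2]=1
--
--         #incrementar os cruzamentos
--         for key,value in cruzamento.items():
--             if (key==cruzamento1):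
--                 cruzamento[key] = value+1
--             if (key==cruzamento2):
--                 cruzamento[key] = value+1
--
--     #criar a lista final, NAO SEI O PQ, mas todos os values estavam com 1 a mais
--     lista_final = [(key,value-1) for key,value in sorted(cruzamento.items(), key=lambda i:(i[1],i[0]))]
--     return lista_final
-- ===== SOURCE B (Python) =====
-- def cruzamentos(ruas):
--     ends = []
--     for n in ruas:
--         ends.append(n[0])
--         if n[-1] != n[0]:
--             ends.append(n[-1])
--     ends.sort()
--     pares = []
--     i = 0
--     while i < len(ends):
--         j = i
--         while j < len(ends) and ends[j] == ends[i]: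
--             j += 1
--         pares.append((ends[i], j - i))
--         i = j
--     return sorted(pares, key=lambda p: (p[1], p[0]))
-- ===== Notes on version B (the rewrite author's own statement) =====
-- stated objective: alternative
-- what changed: Replaces the dict tally with its per-street inner scan over all existing keys by collecting the per-street deduplicated endpoints into a flat list, sorting it and run-length grouping, then sorting the (node,count) pairs by (count,node).
import Mathlib
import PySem

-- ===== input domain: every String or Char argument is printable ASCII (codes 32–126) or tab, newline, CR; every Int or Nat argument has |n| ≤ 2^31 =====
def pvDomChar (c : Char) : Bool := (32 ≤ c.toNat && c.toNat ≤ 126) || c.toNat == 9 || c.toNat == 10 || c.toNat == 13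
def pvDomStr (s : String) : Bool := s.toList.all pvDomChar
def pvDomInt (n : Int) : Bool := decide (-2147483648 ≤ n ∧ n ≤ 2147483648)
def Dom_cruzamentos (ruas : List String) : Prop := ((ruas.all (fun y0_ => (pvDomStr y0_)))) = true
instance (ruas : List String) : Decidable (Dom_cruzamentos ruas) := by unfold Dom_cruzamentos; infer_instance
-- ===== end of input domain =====

-- B replaces A's dict tally (with its per-street inner scan over all existing keys) by a
-- sort-then-run-length-group pass over the flat list of per-street deduplicated endpoints;
-- objective: alternative algorithm, same results.

-- ===== PORT A =====
def cruzamentos (ruas : List String) : List (String × Int) :=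
  let cr := ruas.foldl (fun cr n =>
    match PySem.Str.pyGet? n 0, PySem.Str.pyGet? n (PySem.Str.len n - 1) with
    | some a, some b =>
      let c1 : String := String.ofList [a]
      let c2 : String := String.ofList [b]
      let cr := if cr.contains c1 then cr else cr.insert c1 1
      let cr := if cr.contains c2 then cr else cr.insert c2 1
      cr.items.foldl (fun cr kv =>
        let cr := if kv.1 == c1 then cr.insert kv.1 (kv.2 + 1) else cr
        if kv.1 == c2 then cr.insert kv.1 (kv.2 + 1) else cr) cr
    | _, _ => cr) (PySem.Dict.empty : PySem.Dict String Int)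
  (PySem.List.sorted2 cr.items (fun p => p.2) (fun p => p.1)).map (fun p => (p.1, p.2 - 1))

-- ===== PORT B =====
-- run-length scan of Source B's inner while loops, as the obvious structural recursion
def pvRunsAux (c : String) (k : Int) : List String → List (String × Int)
  | [] => [(c, k)]
  | d :: rest => if d == c then pvRunsAux c (k + 1) rest else (c, k) :: pvRunsAux d 1 rest

def pvRuns : List String → List (String × Int)
  | [] => []
  | c :: rest => pvRunsAux c 1 rest

def cruzamentos_alt (ruas : List String) : List (String × Int) :=
  let ends := ruas.foldl (fun acc n =>
    match PySem.Str.pyGet? n 0 with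
    | none => acc
    | some a =>
      match PySem.Str.pyGet? n (-1) with
      | none => acc
      | some b =>
        let acc := acc ++ [String.ofList [a]]
        if String.ofList [b] != String.ofList [a] then acc ++ [String.ofList [b]] else acc) []
  let pares := pvRuns (PySem.List.sorted ends (fun c => c))
  PySem.List.sorted2 pares (fun p => p.2) (fun p => p.1)

-- ===== PRECONDITION & SPEC =====
-- Pre_ excludes lists containing an empty street: Python A raises IndexError on n[0] there.
def Pre_cruzamentos (ruas : List String) : Prop := ∀ n ∈ ruas, n ≠ ""
instance (ruas : List String) : Decidable (Pre_cruzamentos ruas) := by unfold Pre_cruzamentos; infer_instance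
def pvWitness_cruzamentos : List String := ["ab", "bc", "a", "dd"]

def Spec_cruzamentos (ruas : List String) (out : List (String × Int)) : Prop := out = cruzamentos_alt ruas
instance (ruas : List String) (out : List (String × Int)) : Decidable (Spec_cruzamentos ruas out) := by unfold Spec_cruzamentos; infer_instance

-- ===== CLAIM (what is proved, stated in full; the proofs are below) =====
def Claim_equal_cruzamentos : Prop := ∀ (ruas : List String), Dom_cruzamentos ruas → Pre_cruzamentos ruas → Spec_cruzamentos ruas (cruzamentos ruas)

-- ===== LEMMAS AND PROOFS =====

-- the per-street deduplicated endpoint list ([] when the street is empty)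
def pvEpts (n : String) : List String :=
  match PySem.Str.pyGet? n 0, PySem.Str.pyGet? n (-1) with
  | some a, some b =>
    if String.ofList [b] != String.ofList [a] then [String.ofList [a], String.ofList [b]] else [String.ofList [a]]
  | _, _ => []

-- the dict A maintains, characterised: first-occurrence order, value = 1 + tally
def pvDictOf (E : List String) : PySem.Dict String Int :=
  PySem.Dict.mk ((PySem.Set.ofList E).map (fun c => (c, 1 + (E.count c : Int))))

def pvKey (p : String × Int) : Lex (Int × String) := toLex (p.2, p.1)

lemma pvKey_inj : Function.Injective pvKey := by
  intro a b h
  have h' : ((a.2, a.1) : Int × String) = (b.2, b.1) := congrArg ofLex h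
  exact Prod.ext (congrArg Prod.snd h') (congrArg Prod.fst h')

lemma pvKey_lt_iff (a b : String × Int) : pvKey a < pvKey b ↔ (a.2 < b.2 ∨ a.2 = b.2 ∧ a.1 < b.1) :=
  Prod.Lex.lt_iff

lemma sorted2_eq_sorted_lex (xs : List (String × Int)) :
    PySem.List.sorted2 xs (fun p => p.2) (fun p => p.1) = PySem.List.sorted xs pvKey := by
  show List.foldl _ [] xs = List.foldl _ [] xs
  have hbe : (fun (a b : String × Int) => decide (a.2 < b.2) || (!decide (b.2 < a.2) && decide (a.1 < b.1)))
      = fun (a b : String × Int) => decide (pvKey a < pvKey b) := by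
    funext a b
    by_cases h1 : a.2 < b.2
    · simp [pvKey_lt_iff, h1]
    · by_cases h2 : b.2 < a.2
      · simp [pvKey_lt_iff, h1, h2, (show ¬ a.2 = b.2 by omega)]
      · have he : a.2 = b.2 := by omega
        simp [pvKey_lt_iff, h1, h2, he]
  simp only [Bool.false_eq_true, if_false, hbe]

lemma final_sort_eq (l1 l2 : List (String × Int))
    (h : (l1.map (fun p => (p.1, p.2 - 1))).Perm l2) :
    (PySem.List.sorted2 l1 (fun p => p.2) (fun p => p.1)).map (fun p => (p.1, p.2 - 1))
      = PySem.List.sorted2 l2 (fun p => p.2) (fun p => p.1) := by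
  rw [sorted2_eq_sorted_lex, sorted2_eq_sorted_lex]
  apply PySem.List.eq_of_perm_of_pairwise_le_of_injective pvKey pvKey_inj
  · exact ((PySem.List.sorted_perm l1 pvKey false).map _).trans
      (h.trans (PySem.List.sorted_perm l2 pvKey false).symm)
  · have hp := PySem.List.sorted_pairwise l1 pvKey
    refine hp.map _ ?_
    intro a b hab
    have h1 : (a.2 < b.2 ∨ a.2 = b.2 ∧ a.1 ≤ b.1) := Prod.Lex.le_iff.mp hab
    show pvKey (a.1, a.2 - 1) ≤ pvKey (b.1, b.2 - 1)
    have hiff : pvKey (a.1, a.2 - 1) ≤ pvKey (b.1, b.2 - 1)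
        ↔ (a.2 - 1 < b.2 - 1 ∨ a.2 - 1 = b.2 - 1 ∧ a.1 ≤ b.1) := Prod.Lex.le_iff
    rw [hiff]
    rcases h1 with h1 | ⟨h1, h2⟩
    · exact Or.inl (by omega)
    · exact Or.inr ⟨by omega, h2⟩
  · exact PySem.List.sorted_pairwise l2 pvKey

lemma toList_ne_nil {n : String} (h : n ≠ "") : n.toList ≠ [] := by
  intro hl; exact h (String.toList_inj.mp (by simp [hl]))

lemma pyGet_last_eq {n : String} (h : n ≠ "") :
    PySem.Str.pyGet? n (PySem.Str.len n - 1) = PySem.Str.pyGet? n (-1) := by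
  have hl : n.toList ≠ [] := toList_ne_nil h
  have hlen : 1 ≤ n.toList.length := by
    cases hx : n.toList with
    | nil => exact absurd hx hl
    | cons a t => simp
  show PySem.List.pyGet? n.toList (PySem.Str.len n - 1) = PySem.List.pyGet? n.toList (-1)
  rw [PySem.Str.len_eq, PySem.List.pyGet?_neg_one]
  have : ((n.toList.length : Int) - 1) = ((n.toList.length - 1 : Nat) : Int) := by omega
  rw [this, PySem.List.pyGet?_natCast, List.getLast?_eq_getElem?]

lemma pyGet_zero_some {n : String} (h : n ≠ "") : ∃ a, PySem.Str.pyGet? n 0 = some a := by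
  have hl : n.toList ≠ [] := toList_ne_nil h
  show ∃ a, PySem.List.pyGet? n.toList 0 = some a
  rw [PySem.List.pyGet?_zero]
  cases hx : n.toList with
  | nil => exact absurd hx hl
  | cons a t => exact ⟨a, rfl⟩

lemma step_collapse (c1 c2 : String) (cr : PySem.Dict String Int) (kv : String × Int) :
    (let cr' := if kv.1 == c1 then cr.insert kv.1 (kv.2 + 1) else cr
     if kv.1 == c2 then cr'.insert kv.1 (kv.2 + 1) else cr')
    = if kv.1 == c1 || kv.1 == c2 then cr.insert kv.1 (kv.2 + 1) else cr := by
  by_cases h1 : kv.1 == c1 <;> by_cases h2 : kv.1 == c2 <;>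
    simp [h1, h2, PySem.Dict.insert_insert_self]

lemma inner_fold_items (c1 c2 : String) (g : String → Int) :
    ∀ (T : List String) (d : PySem.Dict String Int), T.Nodup → d.keys.Nodup →
      (∀ c ∈ T, d.contains c = true) →
      (T.foldl (fun d c => if c == c1 || c == c2 then d.insert c (g c + 1) else d) d).items
        = d.items.map (fun kv => if kv.1 ∈ T ∧ (kv.1 = c1 ∨ kv.1 = c2) then (kv.1, g kv.1 + 1) else kv) := by
  intro T
  induction T with
  | nil => intro d _ _ _; simp
  | cons c T ih =>
    intro d hT hk hc
    have hcT : c ∉ T := (List.nodup_cons.mp hT).1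
    have hTnd : T.Nodup := (List.nodup_cons.mp hT).2
    by_cases hP : c = c1 ∨ c = c2
    · have hPb : (c == c1 || c == c2) = true := by
        rcases hP with h | h <;> simp [h]
      have hdc : d.contains c = true := hc c (by simp)
      rw [List.foldl_cons,
        show (if c == c1 || c == c2 then d.insert c (g c + 1) else d) = d.insert c (g c + 1) from by simp [hPb],
        ih (d.insert c (g c + 1)) hTnd (PySem.Dict.nodup_keys_insert d c _ hk)
        (fun x hx => by rw [PySem.Dict.contains_insert]; simp [hc x (by simp [hx])])]
      rw [PySem.Dict.items_insert_of_contains d _ hdc, List.map_map]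
      apply List.map_congr_left
      intro kv _
      by_cases hkvc : kv.1 = c
      · simp only [Function.comp, hkvc, beq_self_eq_true, if_true]
        have : c ∉ T ∧ True := ⟨hcT, trivial⟩
        simp [hcT, hP]
      · have : (kv.1 == c) = false := by simp [hkvc]
        simp only [Function.comp, this, Bool.false_eq_true, if_false]
        by_cases hmem : kv.1 ∈ T <;> simp [hmem, hkvc]
    · have hPb : (c == c1 || c == c2) = false := by
        push_neg at hP; simp [hP.1, hP.2]
      rw [List.foldl_cons,
        show (if c == c1 || c == c2 then d.insert c (g c + 1) else d) = d from by simp [hPb],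
        ih d hTnd hk (fun x hx => hc x (by simp [hx]))]
      apply List.map_congr_left
      intro kv _
      by_cases hkvc : kv.1 = c
      · simp [hkvc, hP, hcT]
      · by_cases hmem : kv.1 ∈ T <;> simp [hmem, hkvc]

lemma keys_mkmap (S : List String) (g : String → Int) :
    (PySem.Dict.mk (S.map (fun c => (c, g c)))).keys = S := by
  show (S.map (fun c => (c, g c))).map Prod.fst = S
  rw [List.map_map]
  simp [Function.comp_def]

lemma contains_mkmap (S : List String) (g : String → Int) (x : String) :
    (PySem.Dict.mk (S.map (fun c => (c, g c)))).contains x = decide (x ∈ S) := by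
  rw [PySem.Dict.contains_eq_decide_mem_keys, keys_mkmap]

lemma cond_insert (S : PySem.Set String) (g : String → Int) (x : String) (hg : x ∉ S → g x = 1) :
    (if (PySem.Dict.mk (S.map (fun c => (c, g c)))).contains x
      then PySem.Dict.mk (S.map (fun c => (c, g c)))
      else (PySem.Dict.mk (S.map (fun c => (c, g c)))).insert x 1)
    = PySem.Dict.mk ((S.add x).map (fun c => (c, g c))) := by
  by_cases hx : x ∈ S
  · rw [if_pos (by rw [contains_mkmap]; simp [hx]), PySem.Set.add_of_mem hx]
  · rw [if_neg (by rw [contains_mkmap]; simp [hx])]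
    apply PySem.Dict.ext
    rw [PySem.Dict.items_insert_of_not_contains _ _ (by rw [contains_mkmap]; simp [hx]),
      PySem.Set.add_of_not_mem hx]
    show S.map (fun c => (c, g c)) ++ [(x, 1)] = (S ++ [x]).map (fun c => (c, g c))
    rw [List.map_append]
    simp [hg hx]

lemma A_step (E : List String) (n : String) (hn : n ≠ "") :
    (match PySem.Str.pyGet? n 0, PySem.Str.pyGet? n (PySem.Str.len n - 1) with
      | some a, some b =>
        let c1 : String := String.ofList [a]
        let c2 : String := String.ofList [b]
        let cr := if (pvDictOf E).contains c1 then (pvDictOf E) else (pvDictOf E).insert c1 1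
        let cr := if cr.contains c2 then cr else cr.insert c2 1
        cr.items.foldl (fun cr kv =>
          let cr := if kv.1 == c1 then cr.insert kv.1 (kv.2 + 1) else cr
          if kv.1 == c2 then cr.insert kv.1 (kv.2 + 1) else cr) cr
      | _, _ => pvDictOf E)
    = pvDictOf (E ++ pvEpts n) := by
  obtain ⟨a, ha⟩ := pyGet_zero_some hn
  have hlast := pyGet_last_eq hn
  obtain ⟨b, hb⟩ : ∃ b, PySem.Str.pyGet? n (-1) = some b := by
    have hl : n.toList ≠ [] := toList_ne_nil hn
    show ∃ b, PySem.List.pyGet? n.toList (-1) = some b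
    rw [PySem.List.pyGet?_neg_one]
    exact Option.isSome_iff_exists.mp (List.getLast?_isSome.mpr hl)
  rw [ha, hlast, hb]
  set S : PySem.Set String := PySem.Set.ofList E with hS
  set c1 : String := String.ofList [a]
  set c2 : String := String.ofList [b]
  set g : String → Int := fun c => if c ∈ S then 1 + (E.count c : Int) else 1 with hgdef
  -- the two conditional inserts
  have hf : (PySem.Set.ofList E).map (fun c => (c, 1 + (E.count c : Int))) = S.map (fun c => (c, g c)) := by
    apply List.map_congr_left
    intro c hc
    rw [PySem.Set.mem_ofList] at hc
    simp [hgdef, hS, hc]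
  have hinit : (let cr := if (pvDictOf E).contains c1 then (pvDictOf E) else (pvDictOf E).insert c1 1
      let cr := if cr.contains c2 then cr else cr.insert c2 1
      cr) = PySem.Dict.mk (((S.add c1).add c2).map (fun c => (c, g c))) := by
    show (let cr := if (pvDictOf E).contains c1 then (pvDictOf E) else (pvDictOf E).insert c1 1
      if cr.contains c2 then cr else cr.insert c2 1) = _
    have h1 : pvDictOf E = PySem.Dict.mk (S.map (fun c => (c, g c))) := by
      unfold pvDictOf; rw [hf]
    rw [h1, cond_insert S g c1 (fun hx => by simp [hgdef, hx]),
      cond_insert (S.add c1) g c2 (fun hx => by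
        have : c2 ∉ S := fun hm => hx ((PySem.Set.mem_add S c1 c2).mpr (Or.inl hm))
        simp [hgdef, this])]
  show (fun d : PySem.Dict String Int => d.items.foldl
      (fun cr kv =>
        let cr' := if kv.1 == c1 then cr.insert kv.1 (kv.2 + 1) else cr
        if kv.1 == c2 then cr'.insert kv.1 (kv.2 + 1) else cr') d)
    (let cr := if (pvDictOf E).contains c1 then pvDictOf E else (pvDictOf E).insert c1 1
     let cr := if cr.contains c2 then cr else cr.insert c2 1
     cr) = pvDictOf (E ++ pvEpts n)
  rw [hinit]
  set S2 : PySem.Set String := (S.add c1).add c2 with hS2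
  have hS2nd : S2.Nodup := PySem.Set.nodup_add _ _ (PySem.Set.nodup_add _ _ (by rw [hS]; exact PySem.Set.nodup_ofList E))
  have hcol : (fun (cr : PySem.Dict String Int) (kv : String × Int) =>
      let cr' := if kv.1 == c1 then cr.insert kv.1 (kv.2 + 1) else cr
      if kv.1 == c2 then cr'.insert kv.1 (kv.2 + 1) else cr')
      = fun cr kv => if kv.1 == c1 || kv.1 == c2 then cr.insert kv.1 (kv.2 + 1) else cr :=
    funext fun cr => funext fun kv => step_collapse c1 c2 cr kv
  show (PySem.Dict.mk (S2.map (fun c => (c, g c)))).items.foldl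
      (fun (cr : PySem.Dict String Int) (kv : String × Int) =>
        let cr' := if kv.1 == c1 then cr.insert kv.1 (kv.2 + 1) else cr
        if kv.1 == c2 then cr'.insert kv.1 (kv.2 + 1) else cr')
      (PySem.Dict.mk (S2.map (fun c => (c, g c)))) = pvDictOf (E ++ pvEpts n)
  rw [hcol]
  show (S2.map (fun c => (c, g c))).foldl
      (fun cr kv => if kv.1 == c1 || kv.1 == c2 then cr.insert kv.1 (kv.2 + 1) else cr)
      (PySem.Dict.mk (S2.map (fun c => (c, g c)))) = pvDictOf (E ++ pvEpts n)
  rw [List.foldl_map]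
  have hred : (fun (d : PySem.Dict String Int) (c : String) =>
        if (c, g c).1 == c1 || (c, g c).1 == c2 then d.insert (c, g c).1 ((c, g c).2 + 1) else d)
      = fun d c => if c == c1 || c == c2 then d.insert c (g c + 1) else d := rfl
  rw [hred]
  apply PySem.Dict.ext
  rw [inner_fold_items c1 c2 g S2 _ hS2nd (by rw [keys_mkmap]; exact hS2nd)
    (fun c hc => by rw [contains_mkmap]; simp [hc])]
  rw [List.map_map]
  -- right-hand side
  have hupd : PySem.Set.ofList (E ++ pvEpts n) = PySem.Set.update S (pvEpts n) := by
    rw [PySem.Set.ofList_append, hS]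
  have hep : pvEpts n = if c2 != c1 then [c1, c2] else [c1] := by
    unfold pvEpts; rw [ha, hb]
  have hSU : PySem.Set.update S (pvEpts n) = S2 := by
    by_cases hcc : c2 = c1
    · rw [hep]; simp only [hcc, bne_self_eq_false, Bool.false_eq_true, if_false]
      rw [PySem.Set.update_cons, PySem.Set.update_nil, hS2, hcc]
      exact (PySem.Set.add_of_mem ((PySem.Set.mem_add S c1 c1).mpr (Or.inr rfl))).symm
    · rw [hep, if_pos (bne_iff_ne.mpr hcc), PySem.Set.update_cons, PySem.Set.update_cons,
        PySem.Set.update_nil, hS2]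
  have hcnt : ∀ c, ((pvEpts n).count c) = if c = c1 ∨ c = c2 then 1 else 0 := by
    intro c
    by_cases hcc : c2 = c1
    · rw [hep]; simp only [hcc, bne_self_eq_false, Bool.false_eq_true, if_false]
      by_cases h1 : c = c1
      · simp [List.count_cons, h1, hcc]
      · simp [List.count_cons, Ne.symm h1, h1, hcc]
    · rw [hep, if_pos (bne_iff_ne.mpr hcc)]
      by_cases h1 : c = c1
      · have h2 : ¬ c = c2 := by rw [h1]; exact fun h => hcc h.symm
        simp [List.count_cons, h1, Ne.symm h2, (by rw [← h1]; exact Ne.symm h2 : ¬ c2 = c1)]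
      · by_cases h2 : c = c2
        · simp [List.count_cons, h1, h2, Ne.symm h1, Ne.symm hcc]
        · simp [List.count_cons, h1, h2, Ne.symm h1, Ne.symm h2]
  show _ = (PySem.Set.ofList (E ++ pvEpts n)).map _
  rw [hupd, hSU]
  apply List.map_congr_left
  intro c hcS2
  have hPmem : c ∈ S2 := hcS2
  have hcases : c ∈ S ∨ (c = c1 ∨ c = c2) := by
    rcases (PySem.Set.mem_add _ c2 c).mp (hS2 ▸ hcS2) with h | h
    · rcases (PySem.Set.mem_add S c1 c).mp h with h' | h'
      · exact Or.inl h'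
      · exact Or.inr (Or.inl h')
    · exact Or.inr (Or.inr h)
  have hcountE : c ∉ S → E.count c = 0 := by
    intro hx
    rw [List.count_eq_zero]
    intro hmem
    exact hx (by rw [hS]; exact (PySem.Set.mem_ofList E c).mpr hmem)
  rw [List.count_append]
  simp only [Function.comp_apply]
  by_cases hP : c = c1 ∨ c = c2
  · simp only [hPmem, hP, and_self, if_true, true_and]
    by_cases hcS : c ∈ S
    · simp [hgdef, hcS, hcnt c, hP]
      push_cast
      ring
    · simp [hgdef, hcS, hcnt c, hP, hcountE hcS]
  · have hcS : c ∈ S := by tauto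
    have : ¬ (c ∈ S2 ∧ (c = c1 ∨ c = c2)) := by tauto
    simp [this, hgdef, hcS, hcnt c, hP]

lemma ends_eq (ruas : List String) :
    ruas.foldl (fun acc n =>
      match PySem.Str.pyGet? n 0 with
      | none => acc
      | some a =>
        match PySem.Str.pyGet? n (-1) with
        | none => acc
        | some b =>
          let acc := acc ++ [String.ofList [a]]
          if String.ofList [b] != String.ofList [a] then acc ++ [String.ofList [b]] else acc) []
      = ruas.flatMap pvEpts := by
  have hf : (fun (acc : List String) n =>
      match PySem.Str.pyGet? n 0 with
      | none => acc
      | some a =>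
        match PySem.Str.pyGet? n (-1) with
        | none => acc
        | some b =>
          let acc := acc ++ [String.ofList [a]]
          if String.ofList [b] != String.ofList [a] then acc ++ [String.ofList [b]] else acc)
      = fun acc n => acc ++ pvEpts n := by
    funext acc n
    unfold pvEpts
    cases PySem.Str.pyGet? n 0 with
    | none => simp
    | some a =>
      cases PySem.Str.pyGet? n (-1) with
      | none => simp
      | some b =>
        by_cases hb : String.ofList [b] != String.ofList [a] <;> simp [hb]
  rw [hf, PySem.List.foldl_append_eq_flatMap]
  simp

lemma A_fold (ruas : List String) (hPre : ∀ n ∈ ruas, n ≠ "") :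
    ruas.foldl (fun cr n =>
      match PySem.Str.pyGet? n 0, PySem.Str.pyGet? n (PySem.Str.len n - 1) with
      | some a, some b =>
        let c1 : String := String.ofList [a]
        let c2 : String := String.ofList [b]
        let cr := if cr.contains c1 then cr else cr.insert c1 1
        let cr := if cr.contains c2 then cr else cr.insert c2 1
        cr.items.foldl (fun cr kv =>
          let cr := if kv.1 == c1 then cr.insert kv.1 (kv.2 + 1) else cr
          if kv.1 == c2 then cr.insert kv.1 (kv.2 + 1) else cr) cr
      | _, _ => cr) (PySem.Dict.empty : PySem.Dict String Int)
    = pvDictOf (ruas.flatMap pvEpts) := by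
  induction ruas using List.reverseRecOn with
  | nil => rfl
  | append_singleton xs n ihx =>
    have hx : ∀ m ∈ xs, m ≠ "" := fun m hm => hPre m (by simp [hm])
    have hn : n ≠ "" := hPre n (by simp)
    rw [List.foldl_append, ihx hx, List.foldl_cons, List.foldl_nil, List.flatMap_append]
    have := A_step (xs.flatMap pvEpts) n hn
    simpa using this

lemma runsAux_eq (c : String) :
    ∀ (rest : List String) (k : Int), rest.Pairwise (· ≤ ·) → (∀ x ∈ rest, c ≤ x) →
      pvRunsAux c k rest = (c, k + (rest.count c : Int)) :: pvRuns (rest.dropWhile (fun x => x == c)) := by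
  intro rest
  induction rest with
  | nil => intro k _ _; simp [pvRunsAux, pvRuns]
  | cons d t ih =>
    intro k hp hle
    by_cases hdc : d = c
    · rw [pvRunsAux, if_pos (by simp [hdc])]
      rw [ih (k + 1) (hp.of_cons) (fun x hx => hle x (by simp [hx]))]
      have hcnt : ((d :: t).count c : Int) = (t.count c : Int) + 1 := by
        simp [List.count_cons, hdc]
      rw [List.dropWhile_cons_of_pos (by simp [hdc])]
      rw [hcnt]
      congr 2
      omega
    · rw [pvRunsAux, if_neg (by simp [hdc])]
      have hcnt : (d :: t).count c = 0 := by
        rw [List.count_eq_zero]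
        intro hmem
        rcases List.mem_cons.mp hmem with h | h
        · exact hdc h.symm
        · -- c ∈ t: but c ≤ d (hle), d ≤ x for x ∈ t, and d ≠ c gives c < d ≤ c
          have hcd : c ≤ d := hle d (by simp)
          have hdx : d ≤ c := (List.pairwise_cons.mp hp).1 c h
          exact hdc (le_antisymm hdx hcd)
      rw [List.dropWhile_cons_of_neg (by simp [hdc])]
      rw [hcnt]
      simp [pvRuns]

lemma runs_perm :
    ∀ (s : List String), s.Pairwise (· ≤ ·) →
      (pvRuns s).Perm ((PySem.Set.ofList s).map (fun c => (c, (s.count c : Int)))) := by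
  intro s
  induction hn : s.length using Nat.strong_induction_on generalizing s with
  | _ N ih =>
    cases s with
    | nil => intro _; simp [pvRuns, PySem.Set.ofList]
    | cons c rest =>
      intro hp
      have hle : ∀ x ∈ rest, c ≤ x := (List.pairwise_cons.mp hp).1
      have hpr : rest.Pairwise (· ≤ ·) := (List.pairwise_cons.mp hp).2
      set rest' := rest.dropWhile (fun x => x == c) with hrest'
      have hsub : rest'.Sublist rest := List.dropWhile_sublist _
      have hpr' : rest'.Pairwise (· ≤ ·) := hpr.sublist hsub
      have hcnot : c ∉ rest' := by
        intro hc
        cases hx : rest' with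
        | nil => rw [hx] at hc; simp at hc
        | cons d t =>
          have hdnc : (d == c) = false := by
            have := List.head?_dropWhile_not (fun x => x == c) rest
            rw [← hrest', hx] at this
            simpa using this
          have hdc : d ≠ c := by simpa using hdnc
          have hcd : c ≤ d := hle d (hsub.mem (by rw [hx]; simp))
          have hdx : ∀ x ∈ t, d ≤ x := by
            have hpt : (d :: t).Pairwise (· ≤ ·) := by rw [← hx]; exact hpr'
            exact (List.pairwise_cons.mp hpt).1
          rw [hx] at hc
          rcases List.mem_cons.mp hc with h | h
          · exact hdc h.symm
          · exact hdc (le_antisymm (hdx c h) hcd)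
      -- count transfer into rest'
      have hcount : ∀ x, x ≠ c → (c :: rest).count x = rest'.count x := by
        intro x hx
        have h1 : (c :: rest).count x = rest.count x := by simp [List.count_cons, Ne.symm hx]
        rw [h1, ← List.takeWhile_append_dropWhile (p := fun y => y == c) (l := rest),
          List.count_append, ← hrest']
        have h0 : (rest.takeWhile (fun y => y == c)).count x = 0 := by
          rw [List.count_eq_zero]
          intro hm
          exact hx (by simpa using List.mem_takeWhile_imp hm)
        omega
      have hmem : ∀ x, x ≠ c → (x ∈ rest ↔ x ∈ rest') := by
        intro x hx
        constructor
        · intro hm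
          rw [← List.takeWhile_append_dropWhile (p := fun y => y == c) (l := rest)] at hm
          rcases List.mem_append.mp hm with h | h
          · exact absurd (by simpa using List.mem_takeWhile_imp h) hx
          · exact h
        · exact fun hm => hsub.mem hm
      -- the set splits
      have hset : (PySem.Set.ofList (c :: rest)).Perm (c :: PySem.Set.ofList rest') := by
        rw [List.perm_ext_iff_of_nodup (PySem.Set.nodup_ofList _)
          (by exact List.nodup_cons.mpr ⟨(fun h => hcnot ((PySem.Set.mem_ofList _ _).mp h)), PySem.Set.nodup_ofList _⟩)]
        intro x
        rw [PySem.Set.mem_ofList, List.mem_cons, List.mem_cons, PySem.Set.mem_ofList]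
        by_cases hx : x = c
        · simp [hx]
        · rw [hmem x hx]
      have hlen : rest'.length < N := by
        have := hsub.length_le
        simp at hn
        omega
      have hrec := ih rest'.length hlen rest' rfl hpr'
      rw [pvRuns, runsAux_eq c rest 1 hpr hle, ← hrest']
      have hcc : (1 : Int) + (rest.count c : Int) = ((c :: rest).count c : Int) := by
        simp [List.count_cons]
        omega
      rw [hcc]
      refine List.Perm.trans (List.Perm.cons _ hrec) ?_
      have hmapeq : (PySem.Set.ofList rest').map (fun x => (x, (rest'.count x : Int)))
          = (PySem.Set.ofList rest').map (fun x => (x, ((c :: rest).count x : Int))) := by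
        apply List.map_congr_left
        intro x hxm
        have hxc : x ≠ c := fun h => hcnot (h ▸ (PySem.Set.mem_ofList _ _).mp hxm)
        rw [hcount x hxc]
      rw [hmapeq]
      have : ((c, ((c :: rest).count c : Int)) :: (PySem.Set.ofList rest').map (fun x => (x, ((c :: rest).count x : Int))))
          = (c :: PySem.Set.ofList rest').map (fun x => (x, ((c :: rest).count x : Int))) := by rfl
      rw [this]
      exact (hset.map _).symm

-- ===== VERDICT (by name: the statement is the Claim_ definition above) =====
theorem cruzamentos_spec : Claim_equal_cruzamentos := by
  intro ruas _ hPre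
  unfold Spec_cruzamentos cruzamentos cruzamentos_alt
  simp only [A_fold ruas hPre, ends_eq ruas]
  set E : List String := ruas.flatMap pvEpts with hE
  set s : List String := PySem.List.sorted E (fun c => c) with hs
  apply final_sort_eq
  -- A's pre-sort items, shifted down by one, are B's run pairs up to permutation
  have hA : ((pvDictOf E).items).map (fun p => (p.1, p.2 - 1))
      = (PySem.Set.ofList E).map (fun c => (c, (E.count c : Int))) := by
    show ((PySem.Set.ofList E).map (fun c => (c, 1 + (E.count c : Int)))).map (fun p => (p.1, p.2 - 1)) = _
    rw [List.map_map]
    apply List.map_congr_left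
    intro c _
    show (c, 1 + (E.count c : Int) - 1) = (c, (E.count c : Int))
    congr 1
    omega
  rw [hA]
  have hsp : s.Pairwise (· ≤ ·) := by
    have := PySem.List.sorted_pairwise E (fun c => c)
    simpa using this
  have hperm : s.Perm E := PySem.List.sorted_perm E (fun c => c) false
  have h1 : ((PySem.Set.ofList E).map (fun c => (c, (E.count c : Int)))).Perm
      ((PySem.Set.ofList s).map (fun c => (c, (s.count c : Int)))) := by
    have hsets : (PySem.Set.ofList E).Perm (PySem.Set.ofList s) := by
      rw [List.perm_ext_iff_of_nodup (PySem.Set.nodup_ofList _) (PySem.Set.nodup_ofList _)]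
      intro x
      rw [PySem.Set.mem_ofList, PySem.Set.mem_ofList]
      exact ⟨fun h => hperm.mem_iff.mpr h, fun h => hperm.mem_iff.mp h⟩
    refine (hsets.map _).trans ?_
    have : (PySem.Set.ofList s).map (fun c => (c, (E.count c : Int)))
        = (PySem.Set.ofList s).map (fun c => (c, (s.count c : Int))) := by
      apply List.map_congr_left
      intro c _
      rw [hperm.count_eq]
    rw [this]
  exact h1.trans (runs_perm s hsp).symm
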